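-- pv_equiv track=rewrite | github.com/StankovskiA/RSEF | src/SSKG/extraction/pdf_extraction_tika.py | extract_possible_title
-- ===== SOURCE A (Python) =====
-- def extract_possible_title(pdf_raw_data):
--     """
--     Given raw data, this function attempts to extract a possible title.
--     ASSUMPTION: The title is assumed to be the first non-line break character and ends with two line breaks \n\n
--     :param pdf_raw_data: String of raw PDF data
--     --
--     :return: Possible title (String), or None if not found
--     """
--     poss_title = ""
--     found_first_char = False
--     previous_was_newline = False
--     for i in pdf_raw_data:
--         if not found_first_char:
--             if i != '\n':
--                 found_first_char = True
--                 poss_title = poss_title + i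
--             else:
--                 continue
--         else:
--             if i == '\n' and previous_was_newline:
--                 return poss_title[:-1]
--             elif i == '\n':
--                 previous_was_newline = True
--                 poss_title = poss_title + " "
--             else:
--                 previous_was_newline = False
--                 poss_title = poss_title + i
--     return None
-- ===== SOURCE B (Python) =====
-- def extract_possible_title(pdf_raw_data):
--     """
--     Given raw data, this function attempts to extract a possible title.
--     ASSUMPTION: The title is assumed to be the first non-line break character and ends with two line breaks \n\n
--     :param pdf_raw_data: String of raw PDF data
--     --
--     :return: Possible title (String), or None if not found
--     """
--     stripped = pdf_raw_data.lstrip('\n')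
--     idx = stripped.find('\n\n')
--     if idx == -1:
--         return None
--     return stripped[:idx].replace('\n', ' ')
-- ===== Notes on version B (the rewrite author's own statement) =====
-- stated objective: faster
-- what changed: Replaces the character-by-character state machine (found_first_char/previous_was_newline flags with incremental quadratic string concatenation) by three linear library scans: lstrip to drop leading newlines, find to locate the double-newline terminator, and a slice plus replace to turn internal newlines into spaces.
import Mathlib
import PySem

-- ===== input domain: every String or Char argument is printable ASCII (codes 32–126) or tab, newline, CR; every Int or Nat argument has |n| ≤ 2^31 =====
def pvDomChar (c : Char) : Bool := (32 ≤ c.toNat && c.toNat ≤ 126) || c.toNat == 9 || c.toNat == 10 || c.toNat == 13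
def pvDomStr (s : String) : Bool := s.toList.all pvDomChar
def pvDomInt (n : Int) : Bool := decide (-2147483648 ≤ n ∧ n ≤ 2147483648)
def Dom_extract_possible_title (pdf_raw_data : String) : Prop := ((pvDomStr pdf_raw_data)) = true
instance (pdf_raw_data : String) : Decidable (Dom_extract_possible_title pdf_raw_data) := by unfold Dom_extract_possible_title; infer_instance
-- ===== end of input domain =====

-- B replaces A's character-by-character state machine by three library scans
-- (lstrip('\n'), find('\n\n'), slice + replace('\n', ' ')); objective: idiomatic, same result.

-- ===== PORT A =====
-- literal port of A's for-loop: state = (poss_title, found_first_char, previous_was_newline),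
-- early 'return poss_title[:-1]' modelled by the recursion returning the Option
def pvGoA (cs : List Char) (acc : List Char) (found prev : Bool) : Option String :=
  match cs with
  | [] => none
  | c :: rest =>
    if found = false then
      if c ≠ '\n' then pvGoA rest (acc ++ [c]) true prev
      else pvGoA rest acc found prev
    else
      if c = '\n' ∧ prev = true then some (String.ofList (PySem.List.slice acc none (some (-1))))
      else if c = '\n' then pvGoA rest (acc ++ [' ']) found true
      else pvGoA rest (acc ++ [c]) found false

def extract_possible_title (pdf_raw_data : String) : Option String :=
  pvGoA pdf_raw_data.toList [] false false

-- ===== PORT B =====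
def extract_possible_title_alt (pdf_raw_data : String) : Option String :=
  -- lstrip('\n') ported by hand as dropWhile (exact: drops exactly the leading '\n' characters)
  let stripped := pdf_raw_data.toList.dropWhile (· == '\n')
  let idx := PySem.Chars.find stripped ['\n', '\n']
  if idx = -1 then none
  else some (String.ofList (PySem.Chars.replace (PySem.List.slice stripped none (some idx)) ['\n'] [' ']))

-- ===== PRECONDITION & SPEC =====
def Spec_extract_possible_title (pdf_raw_data : String) (out : Option String) : Prop := out = extract_possible_title_alt pdf_raw_data
instance (pdf_raw_data : String) (out : Option String) : Decidable (Spec_extract_possible_title pdf_raw_data out) := by unfold Spec_extract_possible_title; infer_instance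

-- ===== CLAIM (what is proved, stated in full; the proofs are below) =====
def Claim_equal_extract_possible_title : Prop := ∀ (pdf_raw_data : String), Dom_extract_possible_title pdf_raw_data → Spec_extract_possible_title pdf_raw_data (extract_possible_title pdf_raw_data)

-- ===== LEMMAS AND PROOFS =====

-- proof-only helpers
def pvNl (c : Char) : Char := if c = '\n' then ' ' else c

def pvKB (s : List Char) : Option (List Char) :=
  if PySem.Chars.find s ['\n', '\n'] = -1 then none
  else some ((s.take (PySem.Chars.find s ['\n', '\n']).toNat).map pvNl)

theorem pv_replace_go (fuel : Nat) : ∀ (l acc : List Char), l.length ≤ fuel →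
    PySem.Chars.replace.go ['\n'] [' '] fuel l acc = acc.reverse ++ l.map pvNl := by
  induction fuel with
  | zero =>
    intro l acc h
    have : l = [] := List.length_eq_zero_iff.mp (Nat.le_zero.mp h)
    subst this; simp [PySem.Chars.replace.go]
  | succ n ih =>
    intro l acc h
    cases l with
    | nil => simp [PySem.Chars.replace.go]
    | cons c t =>
      simp only [PySem.Chars.replace.go]
      by_cases hc : c = '\n'
      · subst hc
        have hp : List.isPrefixOf ['\n'] ('\n' :: t) = true := by simp [List.isPrefixOf]
        rw [if_pos hp]
        rw [show List.drop (['\n'].length) ('\n' :: t) = t from rfl,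
            show [' '].reverse ++ acc = ' ' :: acc from rfl]
        rw [ih t (' ' :: acc) (by simpa using Nat.lt_succ_iff.mp (by simpa using h))]
        simp [pvNl]
      · have hp : List.isPrefixOf ['\n'] (c :: t) = false := by
          simp [List.isPrefixOf]
          exact fun h' => hc h'.symm
        rw [hp]
        simp only [Bool.false_eq_true, if_false]
        rw [ih t (c :: acc) (by simpa using Nat.lt_succ_iff.mp (by simpa using h))]
        simp [pvNl, hc]

theorem pv_replace (l : List Char) :
    PySem.Chars.replace l ['\n'] [' '] = l.map pvNl := by
  simpa using pv_replace_go l.length l [] le_rfl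

-- find points at the first occurrence: uniqueness of that characterisation
theorem pv_find_eq (s pat : List Char) (j : Nat)
    (h1 : pat <+: s.drop j) (h2 : ∀ i < j, ¬ pat <+: s.drop i) :
    PySem.Chars.find s pat = (j : Int) := by
  have hin : PySem.Chars.isIn pat s = true :=
    (PySem.Chars.exists_prefix_drop_iff_isIn pat s).mp ⟨j, h1⟩
  have hinf : pat <:+: s := (PySem.Chars.isIn_iff_infix pat s).mp hin
  have hnn : 0 ≤ PySem.Chars.find s pat := (PySem.Chars.find_nonneg_iff s pat).mpr hinf
  obtain ⟨hpre, hmin⟩ := PySem.Chars.find_spec (s := s) (sub := pat) hnn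
  have hm : (PySem.Chars.find s pat).toNat = j := by
    rcases Nat.lt_trichotomy (PySem.Chars.find s pat).toNat j with hlt | heq | hgt
    · exact absurd hpre (h2 _ hlt)
    · exact heq
    · exact absurd h1 (hmin _ hgt)
  omega

theorem pv_find_two (t : List Char) :
    PySem.Chars.find ('\n' :: '\n' :: t) ['\n', '\n'] = 0 := by
  simpa using pv_find_eq ('\n' :: '\n' :: t) ['\n', '\n'] 0 ⟨t, rfl⟩ (by omega)

theorem pv_find_cons (c : Char) (t : List Char) (h : ¬ ['\n', '\n'] <+: (c :: t)) :
    PySem.Chars.find (c :: t) ['\n', '\n'] =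
      if PySem.Chars.find t ['\n', '\n'] = -1 then -1
      else PySem.Chars.find t ['\n', '\n'] + 1 := by
  split_ifs with hf
  · rw [PySem.Chars.find_eq_neg_one_iff] at hf ⊢
    intro hinf
    obtain ⟨j, hj⟩ := (PySem.Chars.exists_prefix_drop_iff_isIn _ _).mpr
      ((PySem.Chars.isIn_iff_infix _ _).mpr hinf)
    cases j with
    | zero => exact h (by simpa using hj)
    | succ k =>
      exact hf ((PySem.Chars.isIn_iff_infix _ _).mp
        ((PySem.Chars.exists_prefix_drop_iff_isIn _ _).mp ⟨k, by simpa using hj⟩))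
  · have hnn : 0 ≤ PySem.Chars.find t ['\n', '\n'] := by
      have := PySem.Chars.neg_one_le_find t ['\n', '\n']
      omega
    obtain ⟨hpre, hmin⟩ := PySem.Chars.find_spec (s := t) (sub := ['\n', '\n']) hnn
    have := pv_find_eq (c :: t) ['\n', '\n'] ((PySem.Chars.find t ['\n', '\n']).toNat + 1)
      (by simpa using hpre)
      (by
        intro i hi
        cases i with
        | zero => simpa using h
        | succ k => simpa using hmin k (by omega))
    omega

-- shifting one non-terminating character off the front of B's computation
theorem pv_shift (c : Char) (t : List Char) (h : ¬ ['\n', '\n'] <+: (c :: t)) :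
    pvKB (c :: t) = Option.map (fun r => pvNl c :: r) (pvKB t) := by
  unfold pvKB
  rw [pv_find_cons c t h]
  by_cases hf : PySem.Chars.find t ['\n', '\n'] = -1
  · simp [hf]
  · have hnn : 0 ≤ PySem.Chars.find t ['\n', '\n'] := by
      have := PySem.Chars.neg_one_le_find t ['\n', '\n']
      omega
    have hne : ¬ (PySem.Chars.find t ['\n', '\n'] + 1 = -1) := by omega
    have htn : (PySem.Chars.find t ['\n', '\n'] + 1).toNat
        = (PySem.Chars.find t ['\n', '\n']).toNat + 1 := by omega
    simp [hf, hne, htn, List.take_succ_cons]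

theorem pv_no_pair_of_ne (c : Char) (t : List Char) (hc : c ≠ '\n') :
    ¬ ['\n', '\n'] <+: (c :: t) := by
  rintro ⟨u, hu⟩
  simp only [List.cons_append] at hu
  exact hc (by injection hu with h1 _; exact h1.symm) |>.elim

theorem pv_no_pair_snd (c : Char) (t : List Char) (hc : c ≠ '\n') (a : Char) :
    ¬ ['\n', '\n'] <+: (a :: c :: t) := by
  rintro ⟨u, hu⟩
  simp only [List.cons_append] at hu
  injection hu with _ h2
  injection h2 with h2 _
  exact hc h2.symm

-- the main invariant: A's scan after the first title character equals B's computation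
theorem pv_main (cs : List Char) :
    (∀ c, c ≠ '\n' → ∀ acc : List Char,
      pvGoA cs (acc ++ [c]) true false
        = Option.map (fun r => String.ofList (acc ++ r)) (pvKB (c :: cs)))
    ∧ (∀ acc : List Char,
      pvGoA cs (acc ++ [' ']) true true
        = Option.map (fun r => String.ofList (acc ++ r)) (pvKB ('\n' :: cs))) := by
  induction cs with
  | nil =>
    constructor
    · intro c hc acc
      have h1 : pvKB [c] = none := by
        unfold pvKB
        rw [if_pos]
        rw [PySem.Chars.find_eq_neg_one_iff]
        intro hinf
        have := hinf.length_le
        simp at this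
      simp [pvGoA, h1]
    · intro acc
      have h1 : pvKB ['\n'] = none := by
        unfold pvKB
        rw [if_pos]
        rw [PySem.Chars.find_eq_neg_one_iff]
        intro hinf
        have := hinf.length_le
        simp at this
      simp [pvGoA, h1]
  | cons c₀ rest ih =>
    constructor
    · intro c hc acc
      by_cases hc₀ : c₀ = '\n'
      · subst hc₀
        show pvGoA ('\n' :: rest) (acc ++ [c]) true false = _
        rw [show pvGoA ('\n' :: rest) (acc ++ [c]) true false
              = pvGoA rest ((acc ++ [c]) ++ [' ']) true true by
            simp [pvGoA]]
        rw [ih.2 (acc ++ [c])]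
        rw [pv_shift c ('\n' :: rest) (pv_no_pair_of_ne c ('\n' :: rest) hc)]
        cases pvKB ('\n' :: rest) with
        | none => simp
        | some r => simp [pvNl, hc]
      · rw [show pvGoA (c₀ :: rest) (acc ++ [c]) true false
              = pvGoA rest ((acc ++ [c]) ++ [c₀]) true false by
            simp [pvGoA, hc₀]]
        rw [ih.1 c₀ hc₀ (acc ++ [c])]
        rw [pv_shift c (c₀ :: rest) (pv_no_pair_of_ne c (c₀ :: rest) hc)]
        cases pvKB (c₀ :: rest) with
        | none => simp
        | some r => simp [pvNl, hc]
    · intro acc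
      by_cases hc₀ : c₀ = '\n'
      · subst hc₀
        rw [show pvGoA ('\n' :: rest) (acc ++ [' ']) true true
              = some (String.ofList (PySem.List.slice (acc ++ [' ']) none (some (-1)))) by
            simp [pvGoA]]
        have hkb : pvKB ('\n' :: '\n' :: rest) = some [] := by
          unfold pvKB
          rw [pv_find_two]
          norm_num
        rw [hkb]
        rw [PySem.List.slice_to_neg_one]
        simp
      · rw [show pvGoA (c₀ :: rest) (acc ++ [' ']) true true
              = pvGoA rest ((acc ++ [' ']) ++ [c₀]) true false by
            simp [pvGoA, hc₀]]
        rw [ih.1 c₀ hc₀ (acc ++ [' '])]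
        rw [pv_shift '\n' (c₀ :: rest) (pv_no_pair_snd c₀ rest hc₀ '\n')]
        cases pvKB (c₀ :: rest) with
        | none => simp
        | some r => simp [pvNl]

-- the skip of leading newlines equals lstrip('\n')
theorem pv_skip (l : List Char) :
    pvGoA l [] false false
      = Option.map (fun r => String.ofList r) (pvKB (l.dropWhile (· == '\n'))) := by
  induction l with
  | nil =>
    have : pvKB [] = none := by
      unfold pvKB
      rw [if_pos]
      rw [PySem.Chars.find_eq_neg_one_iff]
      intro hinf
      have := hinf.length_le
      simp at this
    simp [pvGoA, this]
  | cons c t ih =>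
    by_cases hc : c = '\n'
    · subst hc
      rw [show pvGoA ('\n' :: t) [] false false = pvGoA t [] false false by simp [pvGoA]]
      rw [ih]
      simp [List.dropWhile]
    · rw [show pvGoA (c :: t) [] false false = pvGoA t ([] ++ [c]) true false by
          simp [pvGoA, hc]]
      rw [(pv_main t).1 c hc []]
      have hb : (c == '\n') = false := by simp [hc]
      rw [show (c :: t).dropWhile (· == '\n') = c :: t by simp [List.dropWhile, hb]]
      simp

-- ===== VERDICT (by name: the statement is the Claim_ definition above) =====
theorem extract_possible_title_spec : Claim_equal_extract_possible_title := by
  unfold Claim_equal_extract_possible_title Spec_extract_possible_title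
  intro s _
  unfold extract_possible_title extract_possible_title_alt
  rw [pv_skip]
  set st := s.toList.dropWhile (· == '\n') with hst
  unfold pvKB
  by_cases hf : PySem.Chars.find st ['\n', '\n'] = -1
  · simp [hf]
  · have hnn : 0 ≤ PySem.Chars.find st ['\n', '\n'] := by
      have := PySem.Chars.neg_one_le_find st ['\n', '\n']
      omega
    simp [hf, PySem.List.slice_to (xs := st) hnn, pv_replace]
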